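-- pv_equiv track=rewrite | github.com/rossop/AdventOfCode | 2024/solutions/21.py | solve_sequence
-- ===== SOURCE A (Python) =====
-- from typing import Any, Deque, Dict, List, Optional, Tuple
-- from itertools import product
--
-- def solve_sequence(
--     string: str,
--     sequences: Dict[Tuple[str, str], List[str]]
-- ) -> List[str]:
--     """Generate all possible movement sequences for a given input string.
--
--     Args:
--         string: Input sequence of buttons to press.
--         sequences: Pre-computed sequences between positions.
--
--     Returns:
--         List of possible movement sequences.
--     """
--     options: List[List[str]] = [
--         sequences[(x, y)] for x, y in zip("A" + string, string)
--     ]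
--     return ["".join(x) for x in product(*options)]
-- ===== SOURCE B (Python) =====
-- def solve_sequence(string, sequences):
--     """Recursive descent on the string: each head choice is prepended to every
--     movement sequence for the remaining suffix (computed once, shared)."""
--     def go(prev, rest):
--         if not rest:
--             return [""]
--         opts = sequences[(prev, rest[0])]
--         tails = go(rest[0], rest[1:])
--         return [o + t for o in opts for t in tails]
--     return go("A", string)
-- ===== Notes on version B (the rewrite author's own statement) =====
-- stated objective: alternative
-- what changed: Replaces the zip-built option lists plus itertools.product by a recursive descent on the string: for each position it looks up the head pair's choices, recursively solves the suffix once, and prepends every head choice to every suffix sequence.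
import Mathlib
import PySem

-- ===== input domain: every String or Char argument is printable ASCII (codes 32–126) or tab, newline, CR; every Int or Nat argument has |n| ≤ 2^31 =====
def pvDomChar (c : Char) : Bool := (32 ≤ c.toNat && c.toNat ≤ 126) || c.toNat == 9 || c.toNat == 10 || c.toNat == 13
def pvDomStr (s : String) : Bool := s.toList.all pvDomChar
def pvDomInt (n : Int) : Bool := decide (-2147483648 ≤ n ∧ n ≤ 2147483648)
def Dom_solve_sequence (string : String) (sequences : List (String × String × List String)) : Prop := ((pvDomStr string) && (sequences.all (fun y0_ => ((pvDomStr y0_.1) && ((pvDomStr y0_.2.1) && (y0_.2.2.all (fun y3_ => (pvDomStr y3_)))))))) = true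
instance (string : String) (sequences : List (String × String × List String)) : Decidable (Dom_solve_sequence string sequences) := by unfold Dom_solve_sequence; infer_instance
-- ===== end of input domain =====

-- B replaces the zip-built option lists + itertools.product by a recursive descent
-- on the string that solves the suffix once and prepends each head choice (objective: alternative).

-- ===== PORT A =====
-- shared helper: `sequences[(x, y)]` — first association-list entry whose two key
-- components equal (x, y); [] only reached outside Pre_ (Python raises KeyError there)
def pvLookup (sequences : List (String × String × List String)) (x y : String) : List String :=
  match sequences with
  | [] => []
  | (a, b, v) :: rest => if a = x ∧ b = y then v else pvLookup rest x y

-- itertools.product(*options): first list varies slowest, last varies fastest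
def pvProd (opts : List (List String)) : List (List String) :=
  match opts with
  | [] => [[]]
  | l :: ls => l.flatMap (fun a => (pvProd ls).map (fun r => a :: r))

def solve_sequence (string : String) (sequences : List (String × String × List String)) : List String :=
  let s := string.toList
  let options : List (List String) :=
    (('A' :: s).zip s).map (fun p => pvLookup sequences (String.singleton p.1) (String.singleton p.2))
  (pvProd options).map (fun x => PySem.Str.join "" x)

-- ===== PORT B =====
-- go(prev, rest) of Source B
def pvGo (sequences : List (String × String × List String)) (prev : Char) (rest : List Char) : List String :=
  match rest with
  | [] => [""]
  | c :: cs =>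
    let opts := pvLookup sequences (String.singleton prev) (String.singleton c)
    let tails := pvGo sequences c cs
    opts.flatMap (fun o => tails.map (fun t => o ++ t))

def solve_sequence_alt (string : String) (sequences : List (String × String × List String)) : List String :=
  pvGo sequences 'A' string.toList

-- ===== PRECONDITION & SPEC =====
-- Pre_ excludes exactly the inputs where Python A raises KeyError: some adjacent
-- key pair of "A" + string has no entry in sequences.
def Pre_solve_sequence (string : String) (sequences : List (String × String × List String)) : Prop :=
  ∀ p ∈ (('A' :: string.toList).zip string.toList),
    ∃ e ∈ sequences, e.1 = String.singleton p.1 ∧ e.2.1 = String.singleton p.2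
instance (string : String) (sequences : List (String × String × List String)) : Decidable (Pre_solve_sequence string sequences) := by unfold Pre_solve_sequence; infer_instance

def pvWitness_solve_sequence : String × (List (String × String × List String)) :=
  ("02", [("A", "0", ["<A", "v<"]), ("0", "2", ["^A"])])

def Spec_solve_sequence (string : String) (sequences : List (String × String × List String)) (out : List String) : Prop := out = solve_sequence_alt string sequences
instance (string : String) (sequences : List (String × String × List String)) (out : List String) : Decidable (Spec_solve_sequence string sequences out) := by unfold Spec_solve_sequence; infer_instance

-- ===== CLAIM (what is proved, stated in full; the proofs are below) =====
def Claim_equal_solve_sequence : Prop := ∀ (string : String) (sequences : List (String × String × List String)), Dom_solve_sequence string sequences → Pre_solve_sequence string sequences → Spec_solve_sequence string sequences (solve_sequence string sequences)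

-- ===== LEMMAS AND PROOFS =====
theorem pv_join_nil_eq_flatten (ls : List (List Char)) : PySem.Chars.join [] ls = ls.flatten := by
  induction ls with
  | nil => rfl
  | cons l ls ih =>
    cases ls with
    | nil => simp [PySem.Chars.join, List.intercalate]
    | cons m ms => simp_all [PySem.Chars.join, List.intercalate, List.intersperse]

theorem pv_join_empty_cons (x : String) (xs : List String) :
    PySem.Str.join "" (x :: xs) = x ++ PySem.Str.join "" xs := by
  simp [PySem.Str.join, pv_join_nil_eq_flatten, String.ofList_append]

-- A's product over the adjacent-pair option lists, joined, is B's recursion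
theorem pv_prod_eq_go (sequences : List (String × String × List String))
    (prev : Char) (rest : List Char) :
    (pvProd (((prev :: rest).zip rest).map
        (fun p => pvLookup sequences (String.singleton p.1) (String.singleton p.2)))).map
      (fun x => PySem.Str.join "" x)
      = pvGo sequences prev rest := by
  induction rest generalizing prev with
  | nil => simp [pvProd, pvGo, PySem.Str.join]
  | cons c cs ih =>
    simp only [List.zip_cons_cons, List.map_cons, pvProd, pvGo, ← ih c]
    simp only [List.flatMap_def, List.map_flatten, List.map_map]
    congr 1
    refine List.map_congr_left (fun o _ => ?_)
    simp [Function.comp, pv_join_empty_cons]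

-- ===== VERDICT (by name: the statement is the Claim_ definition above) =====
theorem solve_sequence_spec : Claim_equal_solve_sequence := by
  intro string sequences _ _
  unfold Spec_solve_sequence solve_sequence solve_sequence_alt
  exact pv_prod_eq_go sequences 'A' string.toList
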